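-- pv_equiv track=rewrite | github.com/chinmaybendigeri/Python | functions/def.py | check_employee_of_month
-- ===== SOURCE A (Python) =====
-- def check_employee_of_month(employee_list):
--     current_max = 0
--     employee_of_month = ''
--
--     for employee,hours in employee_list:
--         if hours > current_max:
--             current_max = hours
--             employee_of_month = employee
--
--     return (employee_of_month,current_max)
-- ===== SOURCE B (Python) =====
-- def check_employee_of_month(employee_list):
--     s = sorted(employee_list, key=lambda x: x[1], reverse=True)
--     if s and s[0][1] > 0:
--         return (s[0][0], s[0][1])
--     return ('', 0)
-- ===== Notes on version B (the rewrite author's own statement) =====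
-- stated objective: alternative
-- what changed: Replaces the running-max accumulator loop with a stable descending sort by hours followed by inspecting only the head element (first maximal element by stability, with the >0 baseline and ('',0) default preserved).
import Mathlib
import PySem

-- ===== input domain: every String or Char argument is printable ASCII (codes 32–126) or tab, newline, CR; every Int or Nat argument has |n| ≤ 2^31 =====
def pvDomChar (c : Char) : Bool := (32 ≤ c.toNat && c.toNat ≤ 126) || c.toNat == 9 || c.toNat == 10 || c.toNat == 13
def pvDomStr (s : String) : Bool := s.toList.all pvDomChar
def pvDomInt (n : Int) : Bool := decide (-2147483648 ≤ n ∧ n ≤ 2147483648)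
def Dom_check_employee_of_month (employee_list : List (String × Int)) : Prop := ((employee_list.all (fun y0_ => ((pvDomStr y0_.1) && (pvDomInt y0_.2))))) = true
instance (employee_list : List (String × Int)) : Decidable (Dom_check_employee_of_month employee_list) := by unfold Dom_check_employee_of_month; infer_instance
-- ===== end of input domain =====

-- B replaces A's running-max accumulator loop by a stable descending sort by hours and a look at the head only (alternative decomposition, same result).

-- ===== PORT A =====
-- state is (current_max, employee_of_month); one update per element, as in A's loop
def check_employee_of_month (employee_list : List (String × Int)) : String × Int :=
  let st := employee_list.foldl
    (fun (st : Int × String) eh => if eh.2 > st.1 then (eh.2, eh.1) else st) (0, "")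
  (st.2, st.1)

-- ===== PORT B =====
def check_employee_of_month_alt (employee_list : List (String × Int)) : String × Int :=
  let s := PySem.List.sorted employee_list (fun x => x.2) true
  match s with
  | [] => ("", 0)
  | (n, h) :: _ => if h > 0 then (n, h) else ("", 0)

-- ===== PRECONDITION & SPEC =====
def Spec_check_employee_of_month (employee_list : List (String × Int)) (out : String × Int) : Prop := out = check_employee_of_month_alt employee_list
instance (employee_list : List (String × Int)) (out : String × Int) : Decidable (Spec_check_employee_of_month employee_list out) := by unfold Spec_check_employee_of_month; infer_instance

-- ===== CLAIM (what is proved, stated in full; the proofs are below) =====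
def Claim_equal_check_employee_of_month : Prop := ∀ (employee_list : List (String × Int)), Dom_check_employee_of_month employee_list → Spec_check_employee_of_month employee_list (check_employee_of_month employee_list)

-- ===== LEMMAS AND PROOFS =====

-- invariant relating A's loop state to the head of B's insertion-sort accumulator
def pvInv (acc : List (String × Int)) (st : Int × String) : Prop :=
  match acc with
  | [] => st = (0, "")
  | (n, h) :: _ => st = if 0 < h then (h, n) else (0, "")

-- one step of A's loop preserves the invariant against one insertBy step of the sort
theorem pvInv_step (acc : List (String × Int)) (st : Int × String) (x : String × Int)
    (h : pvInv acc st) :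
    pvInv (PySem.List.insertBy (fun a b => decide ((b : String × Int).2 < a.2)) x acc)
      (if x.2 > st.1 then (x.2, x.1) else st) := by
  cases acc with
  | nil =>
    simp only [pvInv] at h
    subst h
    simp [PySem.List.insertBy, pvInv]
  | cons y t =>
    obtain ⟨n, hy⟩ := y
    simp only [pvInv] at h
    subst h
    simp only [PySem.List.insertBy]
    by_cases hlt : hy < x.2
    · simp only [hlt, decide_true, if_true, pvInv]
      split_ifs <;> simp_all <;> try omega
    · simp only [hlt, decide_false, pvInv]
      split_ifs <;> simp_all <;> try omega

-- the invariant carries through the whole foldl pair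
theorem pvInv_foldl (xs : List (String × Int)) :
    ∀ (acc : List (String × Int)) (st : Int × String), pvInv acc st →
    pvInv (xs.foldl (fun acc x => PySem.List.insertBy (fun a b => decide ((b : String × Int).2 < a.2)) x acc) acc)
      (xs.foldl (fun (st : Int × String) eh => if eh.2 > st.1 then (eh.2, eh.1) else st) st) := by
  induction xs with
  | nil => intro acc st h; exact h
  | cons x t ih =>
    intro acc st h
    exact ih _ _ (pvInv_step acc st x h)

-- ===== VERDICT (by name: the statement is the Claim_ definition above) =====
theorem check_employee_of_month_spec : Claim_equal_check_employee_of_month := by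
  intro l _
  unfold Spec_check_employee_of_month check_employee_of_month check_employee_of_month_alt
  have h := pvInv_foldl l [] (0, "") rfl
  rw [PySem.List.sorted_rev_eq_foldl_insertBy l (fun x => x.2)]
  cases hs : l.foldl (fun acc x => PySem.List.insertBy (fun a b => decide ((b : String × Int).2 < a.2)) x acc) [] with
  | nil => rw [hs] at h; simp only [pvInv] at h; simp [h]
  | cons y t =>
    obtain ⟨n, hy⟩ := y
    rw [hs] at h
    simp only [pvInv] at h
    by_cases h1 : 0 < hy
    · rw [if_pos h1] at h
      simp [h, h1]
    · rw [if_neg h1] at h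
      simp [h, h1]
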